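-- pv_equiv track=rewrite | github.com/jaekwanyda/algorithm | practice/프로그래머스/프로그래머스(롤케이크자르기).py | solution
-- ===== SOURCE A (Python) =====
-- def solution(topping):
--     n=len(topping)
--     top_set=set()
--     back_data=set()
--     back_data.add(topping[n-1])
--     back_array=[0]*(len(topping))
--     back_array[0]=1
--     answer=0
--     for i in range(1,n):
--         if not topping[n-1-i] in back_data:
--             back_data.add(topping[n-1-i])
--         back_array[i]=len(back_data)
--
--     for i in range(n-1):
--         top_set.add(topping[i])
--         if len(top_set)==back_array[-i-2]:
--             answer+=1
--     return answer
-- ===== SOURCE B (Python) =====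
-- def solution(topping):
--     n = len(topping)
--     return sum(1 for i in range(1, n)
--                if len(set(topping[:i])) == len(set(topping[i:])))
-- ===== Notes on version B (the rewrite author's own statement) =====
-- stated objective: simpler
-- what changed: B replaces A's precomputed suffix-distinct array plus incremental prefix set with a single comprehension that recomputes len(set(prefix)) and len(set(suffix)) directly at each cut position.
import Mathlib
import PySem

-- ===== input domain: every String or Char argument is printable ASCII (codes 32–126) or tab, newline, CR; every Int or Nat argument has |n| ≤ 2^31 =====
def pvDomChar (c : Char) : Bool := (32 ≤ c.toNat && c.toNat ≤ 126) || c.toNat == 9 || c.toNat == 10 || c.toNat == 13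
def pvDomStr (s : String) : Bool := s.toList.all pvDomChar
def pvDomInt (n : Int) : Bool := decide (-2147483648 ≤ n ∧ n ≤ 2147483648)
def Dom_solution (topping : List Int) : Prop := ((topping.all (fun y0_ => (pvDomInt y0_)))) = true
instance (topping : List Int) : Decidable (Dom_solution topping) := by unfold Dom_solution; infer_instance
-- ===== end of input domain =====

-- B is a plain per-cut recomputation with set(); A keeps a suffix-distinct array and an incremental
-- prefix set. B is simpler, not faster (O(n^2) vs A's O(n)).

-- ===== PORT A =====
def aStep (topping : List Int) (n : Int) (st : PySem.Set Int × List Int) (i : Int) :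
    PySem.Set Int × List Int :=
  let x := PySem.List.pyGetD topping (n - 1 - i) 0
  let bd := if ¬ PySem.Set.contains st.1 x then PySem.Set.add st.1 x else st.1
  (bd, PySem.List.pySetD st.2 i (PySem.Set.len bd))

def aAns (topping : List Int) (back_array : List Int) (st : PySem.Set Int × Int) (i : Int) :
    PySem.Set Int × Int :=
  let ts := PySem.Set.add st.1 (PySem.List.pyGetD topping i 0)
  (ts, if PySem.Set.len ts = PySem.List.pyGetD back_array (-i - 2) 0 then st.2 + 1 else st.2)

def solution (topping : List Int) : Int :=
  let n : Int := (topping.length : Int)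
  let back_data : PySem.Set Int :=
    PySem.Set.add PySem.Set.empty (PySem.List.pyGetD topping (n - 1) 0)
  let back_array : List Int := PySem.List.pySetD (List.replicate topping.length (0 : Int)) 0 1
  let st1 := (PySem.List.pyRange 1 n 1).foldl (aStep topping n) (back_data, back_array)
  let st2 := (PySem.List.pyRange 0 (n - 1) 1).foldl (aAns topping st1.2) (PySem.Set.empty, 0)
  st2.2

-- ===== PORT B =====
def bStep (topping : List Int) (acc : Int) (i : Int) : Int :=
  if PySem.Set.len (PySem.Set.ofList (PySem.List.slice topping none (some i)))
      = PySem.Set.len (PySem.Set.ofList (PySem.List.slice topping (some i) none))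
  then acc + 1 else acc

def solution_alt (topping : List Int) : Int :=
  let n : Int := (topping.length : Int)
  (PySem.List.pyRange 1 n 1).foldl (bStep topping) 0

-- ===== PRECONDITION & SPEC =====
-- Pre_ excludes only the empty list, on which A raises IndexError (topping[n-1] with n = 0).
def Pre_solution (topping : List Int) : Prop := topping ≠ []
instance (topping : List Int) : Decidable (Pre_solution topping) := by
  unfold Pre_solution; infer_instance

def pvWitness_solution : List Int := [1, 2, 1, 2]

def Spec_solution (topping : List Int) (out : Int) : Prop := out = solution_alt topping
instance (topping : List Int) (out : Int) : Decidable (Spec_solution topping out) := by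
  unfold Spec_solution; infer_instance

-- ===== CLAIM (what is proved, stated in full; the proofs are below) =====
def Claim_equal_solution : Prop :=
  ∀ (topping : List Int), Dom_solution topping → Pre_solution topping →
    Spec_solution topping (solution topping)

-- ===== LEMMAS AND PROOFS =====

/-- Distinct count of a list, as Python's `len(set(l))`. -/
def dc (l : List Int) : Int := PySem.Set.len (PySem.Set.ofList l)

/-- Reference count: number of cut positions `j+1` for `j < k` with equal distinct counts. -/
def cnt (t : List Int) : Nat → Int
  | 0 => 0
  | k + 1 => cnt t k + (if dc (t.take (k + 1)) = dc (t.drop (k + 1)) then 1 else 0)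

lemma len_eq_dc (s : PySem.Set Int) (l : List Int) (hn : s.Nodup)
    (hm : ∀ x, x ∈ s ↔ x ∈ l) : (s.length : Int) = dc l := by
  have hp : s.Perm (PySem.Set.ofList l) := by
    refine (List.perm_ext_iff_of_nodup hn (PySem.Set.nodup_ofList l)).2 (fun x => ?_)
    rw [PySem.Set.mem_ofList]; exact hm x
  simp [dc, PySem.Set.len, hp.length_eq]

lemma altB (t : List Int) : ∀ m : Nat,
    (PySem.List.pyRange 1 (m : Int) 1).foldl (bStep t) 0 = cnt t (m - 1) := by
  intro m
  induction m with
  | zero => simp [PySem.List.pyRange_one_eq_nil, cnt]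
  | succ m ih =>
    rcases Nat.eq_zero_or_pos m with hm | hm
    · subst hm; simp [PySem.List.pyRange_one_eq_nil, cnt]
    · have h1 : (1 : Int) ≤ (m : Int) := by exact_mod_cast hm
      have : ((m + 1 : Nat) : Int) = (m : Int) + 1 := by push_cast; ring
      rw [this, PySem.List.pyRange_one_succ_right h1, List.foldl_append, ih]
      have hs : m - 1 + 1 = m := Nat.succ_pred_eq_of_pos hm
      simp only [List.foldl_cons, List.foldl_nil, bStep,
        PySem.List.slice_to_natCast, PySem.List.slice_from_natCast]
      rw [show (m + 1) - 1 = m from rfl, ← hs, cnt]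
      simp [dc, hs]
      split_ifs <;> ring

lemma solution_alt_eq (t : List Int) : solution_alt t = cnt t (t.length - 1) := by
  simpa [solution_alt] using altB t t.length

lemma dc_singleton (x : Int) : dc [x] = 1 := by
  simp [dc, PySem.Set.len, PySem.Set.ofList_cons, PySem.Set.ofList_nil, PySem.Set.discard]

lemma aStep_bd (t : List Int) (n : Int) (st : PySem.Set Int × List Int) (i : Int) :
    aStep t n st i =
      (PySem.Set.add st.1 (PySem.List.pyGetD t (n - 1 - i) 0),
       PySem.List.pySetD st.2 i
         (PySem.Set.len (PySem.Set.add st.1 (PySem.List.pyGetD t (n - 1 - i) 0)))) := by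
  unfold aStep
  by_cases h : PySem.List.pyGetD t (n - 1 - i) 0 ∈ st.1
  · simp [h, PySem.Set.add_of_mem]
  · simp [h]

lemma phase1 (t : List Int) (ht : t ≠ []) : ∀ m : Nat, 1 ≤ m → m ≤ t.length →
    (((PySem.List.pyRange 1 (m : Int) 1).foldl (aStep t (t.length : Int))
        (PySem.Set.add PySem.Set.empty (PySem.List.pyGetD t ((t.length : Int) - 1) 0),
         PySem.List.pySetD (List.replicate t.length (0 : Int)) 0 1)).1.Nodup) ∧
    (∀ x, x ∈ ((PySem.List.pyRange 1 (m : Int) 1).foldl (aStep t (t.length : Int))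
        (PySem.Set.add PySem.Set.empty (PySem.List.pyGetD t ((t.length : Int) - 1) 0),
         PySem.List.pySetD (List.replicate t.length (0 : Int)) 0 1)).1 ↔
        x ∈ t.drop (t.length - m)) ∧
    (((PySem.List.pyRange 1 (m : Int) 1).foldl (aStep t (t.length : Int))
        (PySem.Set.add PySem.Set.empty (PySem.List.pyGetD t ((t.length : Int) - 1) 0),
         PySem.List.pySetD (List.replicate t.length (0 : Int)) 0 1)).2.length = t.length) ∧
    (∀ j : Nat, j < m →
      ((PySem.List.pyRange 1 (m : Int) 1).foldl (aStep t (t.length : Int))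
        (PySem.Set.add PySem.Set.empty (PySem.List.pyGetD t ((t.length : Int) - 1) 0),
         PySem.List.pySetD (List.replicate t.length (0 : Int)) 0 1)).2.getD j 0 =
        dc (t.drop (t.length - 1 - j))) := by
  have hn : 1 ≤ t.length := List.length_pos_iff.2 ht
  intro m
  induction m with
  | zero => omega
  | succ m ih =>
    intro _ hm1
    rcases Nat.eq_zero_or_pos m with hm | hm
    · -- base case m+1 = 1
      subst hm
      have hr : PySem.List.pyRange 1 ((1 : Nat) : Int) 1 = [] := by
        apply PySem.List.pyRange_one_eq_nil; norm_num
      have hx : PySem.List.pyGetD t ((t.length : Int) - 1) 0 = t[t.length - 1]'(by omega) := by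
        rw [PySem.List.pyGetD_eq_getElem t 0 (by omega) (by omega)]
        congr 1; omega
      have hdrop : t.drop (t.length - 1) = [t[t.length - 1]'(by omega)] := by
        rw [List.drop_eq_getElem_cons (by omega)]
        simp [show t.length - 1 + 1 = t.length by omega]
      have hbd0 : PySem.Set.add PySem.Set.empty (PySem.List.pyGetD t ((t.length : Int) - 1) 0)
          = [PySem.List.pyGetD t ((t.length : Int) - 1) 0] := by
        rw [PySem.Set.add_of_not_mem (by exact List.not_mem_nil)]
        rfl
      refine ⟨?_, ?_, ?_, ?_⟩
      · simp
      · intro x; simp [hdrop, hx]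
      · rw [hr]; simp [pysem]
      · intro j hj
        interval_cases j
        rw [hr]
        simp only [List.foldl_nil]
        have : (PySem.List.pySetD (List.replicate t.length (0:Int)) 0 1).getD 0 0 = 1 := by
          obtain ⟨a, t', rfl⟩ := List.exists_cons_of_ne_nil ht
          simp [pysem, List.replicate_succ, List.getD]
        rw [this, show t.length - 1 - 0 = t.length - 1 by omega, hdrop, dc_singleton]
    · -- step case
      have ihm := ih hm (by omega)
      obtain ⟨ihn, ihmem, ihlen, ihval⟩ := ihm
      have hcast : ((m + 1 : Nat) : Int) = (m : Int) + 1 := by push_cast; ring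
      rw [hcast, PySem.List.pyRange_one_succ_right (by exact_mod_cast hm), List.foldl_append,
        List.foldl_cons, List.foldl_nil] at *
      set st := (PySem.List.pyRange 1 (m : Int) 1).foldl (aStep t (t.length : Int))
        (PySem.Set.add PySem.Set.empty (PySem.List.pyGetD t ((t.length : Int) - 1) 0),
         PySem.List.pySetD (List.replicate t.length (0 : Int)) 0 1) with hst
      rw [aStep_bd]
      dsimp only
      have hidx : PySem.List.pyGetD t ((t.length : Int) - 1 - (m : Int)) 0
          = t[t.length - 1 - m]'(by omega) := by
        rw [PySem.List.pyGetD_eq_getElem t 0 (by omega) (by omega)]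
        congr 1; omega
      have hdrop : t.drop (t.length - 1 - m) =
          t[t.length - 1 - m]'(by omega) :: t.drop (t.length - m) := by
        rw [List.drop_eq_getElem_cons (by omega)]
        congr 2; omega
      refine ⟨PySem.Set.nodup_add _ _ ihn, ?_, ?_, ?_⟩
      · intro x
        rw [PySem.Set.mem_add, show t.length - (m + 1) = t.length - 1 - m by omega, hdrop]
        simp [ihmem x, hidx]
        tauto
      · rw [PySem.List.pySetD_natCast]
        simp [List.length_set, ihlen]
      · intro j hj
        rw [PySem.List.pySetD_natCast]
        rcases Nat.lt_or_ge j m with hjm | hjm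
        · rw [List.getD_eq_getElem?_getD, List.getElem?_set]
          rw [if_neg (by omega), ← List.getD_eq_getElem?_getD]
          exact ihval j hjm
        · have hjeq : j = m := by omega
          subst hjeq
          rw [List.getD_eq_getElem?_getD, List.getElem?_set]
          simp only [if_true]
          rw [if_pos (show j < st.2.length by omega)]
          simp only [Option.getD_some]
          have hlen := len_eq_dc (PySem.Set.add st.1 (PySem.List.pyGetD t ((t.length : Int) - 1 - (j : Int)) 0))
            (t.drop (t.length - 1 - j)) (PySem.Set.nodup_add _ _ ihn) ?_
          · simpa [PySem.Set.len] using hlen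
          · intro x
            rw [PySem.Set.mem_add, hdrop]
            simp [ihmem x, hidx]
            tauto

lemma phase2 (t : List Int) (ht : t ≠ []) (ba : List Int) (hlen : ba.length = t.length)
    (hba : ∀ j, j < t.length → ba.getD j 0 = dc (t.drop (t.length - 1 - j))) :
    ∀ m : Nat, m ≤ t.length - 1 →
      (((PySem.List.pyRange 0 (m : Int) 1).foldl (aAns t ba) (PySem.Set.empty, 0)).1.Nodup) ∧
      (∀ x, x ∈ ((PySem.List.pyRange 0 (m : Int) 1).foldl (aAns t ba)
          (PySem.Set.empty, 0)).1 ↔ x ∈ t.take m) ∧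
      ((PySem.List.pyRange 0 (m : Int) 1).foldl (aAns t ba) (PySem.Set.empty, 0)).2 = cnt t m := by
  have hn : 1 ≤ t.length := List.length_pos_iff.2 ht
  intro m
  induction m with
  | zero =>
    refine fun _ => ⟨?_, ?_, ?_⟩ <;>
      simp [PySem.List.pyRange_one_eq_nil (by norm_num : (0:Int) ≤ 0), cnt, PySem.Set.empty]
  | succ m ih =>
    intro hm1
    obtain ⟨ihn, ihmem, ihans⟩ := ih (by omega)
    have hmlen : m < t.length := by omega
    have hm2 : m + 2 ≤ t.length := by omega
    have hcast : ((m + 1 : Nat) : Int) = (m : Int) + 1 := by push_cast; ring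
    rw [hcast, PySem.List.pyRange_one_succ_right (by positivity), List.foldl_append,
      List.foldl_cons, List.foldl_nil]
    set st := (PySem.List.pyRange 0 (m : Int) 1).foldl (aAns t ba) (PySem.Set.empty, 0) with hst
    unfold aAns
    dsimp only
    have hx : PySem.List.pyGetD t (m : Int) 0 = t[m]'hmlen := by
      rw [PySem.List.pyGetD_eq_getElem t 0 (by omega) (by exact_mod_cast hmlen)]
      simp
    have htake : t.take (m + 1) = t.take m ++ [t[m]'hmlen] := by
      rw [List.take_add_one, List.getElem?_eq_getElem hmlen]
      simp
    have hmemts : ∀ x, x ∈ PySem.Set.add st.1 (PySem.List.pyGetD t (m : Int) 0) ↔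
        x ∈ t.take (m + 1) := by
      intro x
      simp only [PySem.Set.mem_add, hx, htake, ihmem x, List.mem_append,
        List.mem_singleton]
    have hLHS := len_eq_dc _ _ (PySem.Set.nodup_add _ _ ihn) hmemts
    have hRHS : PySem.List.pyGetD ba (-(m : Int) - 2) 0 = dc (t.drop (m + 1)) := by
      rw [show (-(m : Int) - 2) = -((m + 2 : Nat) : Int) from by push_cast; ring,
        PySem.List.pyGetD_neg_natCast ba (m + 2) 0 (by omega) (by omega)]
      rw [← List.getD_eq_getElem ba 0 (by omega)]
      rw [show ba.length - (m + 2) = t.length - (m + 2) from by omega]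
      rw [hba (t.length - (m + 2)) (by omega),
        show t.length - 1 - (t.length - (m + 2)) = m + 1 from by omega]
    refine ⟨PySem.Set.nodup_add _ _ ihn, hmemts, ?_⟩
    rw [hRHS, ihans, show PySem.Set.len (PySem.Set.add st.1 (PySem.List.pyGetD t (m : Int) 0))
        = dc (t.take (m + 1)) from hLHS]
    rw [cnt]
    split_ifs <;> ring

theorem solution_spec : Claim_equal_solution := by
  intro t _ hpre
  unfold Spec_solution
  have hn : 1 ≤ t.length := List.length_pos_iff.2 hpre
  rw [solution_alt_eq]
  unfold solution
  dsimp only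
  obtain ⟨_, _, hlen, hval⟩ := phase1 t hpre t.length hn le_rfl
  have h2 := (phase2 t hpre _ hlen hval (t.length - 1) le_rfl).2.2
  rw [show ((t.length - 1 : Nat) : Int) = (t.length : Int) - 1 from by omega] at h2
  exact h2
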